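-- pv_equiv track=rewrite | github.com/jfelipe-santosf/SQL-Compare-App | src/sql_compare/ui/main_window.py | _format_definition_with_go
-- ===== SOURCE A (Python) =====
-- def _format_definition_with_go(text: str) -> str:
--     """Format object definition with GO statements in DACFx style"""
--     result = []
--     current_batch = []
--
--     for line in text.splitlines():
--         if line.strip().upper() == 'GO':
--             if current_batch:
--                 result.append('\n'.join(current_batch))
--                 result.append('GO')
--                 current_batch = []
--         else:
--             current_batch.append(line)
--
--     if current_batch:
--         result.append('\n'.join(current_batch))
--         result.append('GO')
--
--     return '\n'.join(result)
-- ===== SOURCE B (Python) =====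
-- def _format_definition_with_go(text: str) -> str:
--     """Format object definition with GO statements in DACFx style"""
--     lines = text.splitlines()
--     go = [i for i, line in enumerate(lines) if line.strip().upper() == 'GO']
--     cuts = [-1] + go + [len(lines)]
--     parts = []
--     for a, b in zip(cuts, cuts[1:]):
--         if b - a > 1:
--             parts.append('\n'.join(lines[a + 1:b]))
--             parts.append('GO')
--     return '\n'.join(parts)
-- ===== Notes on version B (the rewrite author's own statement) =====
-- stated objective: alternative
-- what changed: Instead of a running buffer flushed at each separator, B first computes the list of GO-line indices, forms cut positions [-1]+go+[len], and emits one batch per adjacent cut pair whose gap exceeds 1 by slicing the line list.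
import Mathlib
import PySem

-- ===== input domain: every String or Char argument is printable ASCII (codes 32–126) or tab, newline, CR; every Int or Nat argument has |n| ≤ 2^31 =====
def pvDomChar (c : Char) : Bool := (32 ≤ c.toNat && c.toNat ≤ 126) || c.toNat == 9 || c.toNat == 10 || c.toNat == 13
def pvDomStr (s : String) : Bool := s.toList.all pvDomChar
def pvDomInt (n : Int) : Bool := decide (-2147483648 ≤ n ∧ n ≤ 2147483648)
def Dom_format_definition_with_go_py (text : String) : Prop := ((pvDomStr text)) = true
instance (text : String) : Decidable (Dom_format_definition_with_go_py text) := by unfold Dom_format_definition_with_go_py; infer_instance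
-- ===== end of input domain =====

-- B replaces A's manually flushed running buffer by a staged, index-based algorithm:
-- it first lists the positions of GO lines, forms cut positions, and slices out one
-- batch per adjacent cut pair with gap > 1 (alternative decomposition, same cost).


-- line.strip().upper() == 'GO'
def pvIsGo (line : String) : Bool := PySem.Str.upper (PySem.Str.strip line) == "GO"

-- ===== PORT A =====
def format_definition_with_go_py (text : String) : String :=
  let st := (PySem.Str.splitlines text).foldl
    (fun (st : List String × List String) line =>
      if pvIsGo line then
        if st.2 ≠ [] then (st.1 ++ [PySem.Str.join "\n" st.2, "GO"], []) else st
      else (st.1, st.2 ++ [line]))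
    ([], [])
  let result := if st.2 ≠ [] then st.1 ++ [PySem.Str.join "\n" st.2, "GO"] else st.1
  PySem.Str.join "\n" result

-- ===== PORT B =====
-- go = [i for i, line in enumerate(lines) if line.strip().upper() == 'GO']
def pvGoIdx (lines : List String) (s : Int) : List Int :=
  ((PySem.List.enumerate lines s).filter (fun p => pvIsGo p.2)).map (·.1)

def format_definition_with_go_py_alt (text : String) : String :=
  let lines := PySem.Str.splitlines text
  let go := pvGoIdx lines 0
  let cuts := [(-1 : Int)] ++ go ++ [(lines.length : Int)]
  let parts := (cuts.zip cuts.tail).foldl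
    (fun out p =>
      if p.2 - p.1 > 1 then
        out ++ [PySem.Str.join "\n" (PySem.List.slice lines (some (p.1 + 1)) (some p.2)), "GO"]
      else out) []
  PySem.Str.join "\n" parts

-- ===== PRECONDITION & SPEC =====
def Spec_format_definition_with_go_py (text : String) (out : String) : Prop := out = format_definition_with_go_py_alt text
instance (text : String) (out : String) : Decidable (Spec_format_definition_with_go_py text out) := by unfold Spec_format_definition_with_go_py; infer_instance

-- ===== CLAIM (what is proved, stated in full; the proofs are below) =====
def Claim_equal_format_definition_with_go_py : Prop := ∀ (text : String), Dom_format_definition_with_go_py text → Spec_format_definition_with_go_py text (format_definition_with_go_py text)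

-- ===== LEMMAS AND PROOFS =====

-- A's loop body and final flush, named for the proofs (definitionally equal to the port's inline code)
def pvStep (st : List String × List String) (line : String) : List String × List String :=
  if pvIsGo line then
    if st.2 ≠ [] then (st.1 ++ [PySem.Str.join "\n" st.2, "GO"], []) else st
  else (st.1, st.2 ++ [line])

def pvFlush (st : List String × List String) : List String :=
  if st.2 ≠ [] then st.1 ++ [PySem.Str.join "\n" st.2, "GO"] else st.1

-- recursive characterization of A's loop (proof helper)
def pvAspec : List String → List String → List String
  | [], cur => if cur ≠ [] then [PySem.Str.join "\n" cur, "GO"] else []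
  | l :: ls, cur =>
    if pvIsGo l then
      if cur ≠ [] then [PySem.Str.join "\n" cur, "GO"] ++ pvAspec ls [] else pvAspec ls cur
    else pvAspec ls (cur ++ [l])

-- B's batch for one adjacent pair of cuts, and its list-level result
def pvBatch (lines : List String) (p : Int × Int) : List String :=
  if p.2 - p.1 > 1 then
    [PySem.Str.join "\n" (PySem.List.slice lines (some (p.1 + 1)) (some p.2)), "GO"]
  else []

def pvCuts (lines : List String) : List Int :=
  [-1] ++ pvGoIdx lines 0 ++ [(lines.length : Int)]

def pvBparts (lines : List String) : List String :=
  ((pvCuts lines).zip (pvCuts lines).tail).flatMap (pvBatch lines)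

lemma pvA_foldl (ls : List String) : ∀ res cur,
    pvFlush (ls.foldl pvStep (res, cur)) = res ++ pvAspec ls cur := by
  induction ls with
  | nil =>
    intro res cur
    simp only [pvAspec, pvFlush, List.foldl_nil]
    split <;> simp
  | cons l ls ih =>
    intro res cur
    simp only [List.foldl_cons, pvAspec, pvStep]
    cases hg : pvIsGo l
    · simp only [Bool.false_eq_true, if_false]
      rw [ih]
    · by_cases hc : cur = []
      · simp [hc, ih]
      · simp only [if_true, hc, ne_eq, not_false_iff]
        rw [ih]
        simp

-- A flushes a nonempty buffer exactly at the end of the pending non-GO run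
lemma pvAspec_ne (ls : List String) : ∀ cur, cur ≠ [] →
    pvAspec ls cur =
      [PySem.Str.join "\n" (cur ++ ls.takeWhile (fun x => !pvIsGo x)), "GO"]
        ++ pvAspec (ls.dropWhile (fun x => !pvIsGo x)) [] := by
  induction ls with
  | nil => intro cur hc; simp [pvAspec, hc]
  | cons l ls ih =>
    intro cur hc
    cases hg : pvIsGo l
    · simp only [pvAspec, hg, Bool.false_eq_true, if_false, List.takeWhile_cons,
        List.dropWhile_cons, Bool.not_false, if_true]
      rw [ih (cur ++ [l]) (by simp)]
      simp
    · simp [pvAspec, hg, hc]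


-- B's port computes pvBparts
lemma pvB_eq_Bparts (text : String) :
    format_definition_with_go_py_alt text
      = PySem.Str.join "\n" (pvBparts (PySem.Str.splitlines text)) := by
  unfold format_definition_with_go_py_alt pvBparts pvCuts
  have hbody : (fun (out : List String) (p : Int × Int) =>
      if p.2 - p.1 > 1 then
        out ++ [PySem.Str.join "\n"
          (PySem.List.slice (PySem.Str.splitlines text) (some (p.1 + 1)) (some p.2)), "GO"]
      else out)
      = fun out p => out ++ pvBatch (PySem.Str.splitlines text) p := by
    funext out p
    unfold pvBatch
    split <;> simp
  simp only [hbody, PySem.List.foldl_append_eq_flatMap, List.nil_append]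

-- pvGoIdx structural lemmas
lemma pvGoIdx_cons (l : String) (ls : List String) (s : Int) :
    pvGoIdx (l :: ls) s = (if pvIsGo l then [s] else []) ++ pvGoIdx ls (s + 1) := by
  simp only [pvGoIdx, PySem.List.enumerate_cons, List.filter_cons]
  split <;> simp

lemma pvGoIdx_append (t d : List String) (s : Int) :
    pvGoIdx (t ++ d) s = pvGoIdx t s ++ pvGoIdx d (s + t.length) := by
  simp [pvGoIdx, PySem.List.enumerate_append]

lemma pvGoIdx_nil_of (t : List String) (s : Int) (h : ∀ x ∈ t, pvIsGo x = false) :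
    pvGoIdx t s = [] := by
  simp only [pvGoIdx, List.map_eq_nil_iff, List.filter_eq_nil_iff]
  intro p hp
  rcases (PySem.List.mem_enumerate_iff t s p).1 hp with ⟨k, hk, rfl⟩
  simp [h _ (List.getElem_mem hk)]

lemma pvGoIdx_shift (ls : List String) : ∀ s : Int,
    pvGoIdx ls s = (pvGoIdx ls 0).map (· + s) := by
  induction ls with
  | nil => intro s; simp [pvGoIdx]
  | cons l ls ih =>
    intro s
    rw [pvGoIdx_cons, pvGoIdx_cons, ih (s + 1), ih (0 + 1), List.map_append, List.map_map]
    have h1 : (if pvIsGo l then [s] else []) = List.map (· + s) (if pvIsGo l then [(0 : ℤ)] else []) := by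
      split <;> simp
    have h2 : List.map (· + (s + 1)) (pvGoIdx ls 0)
        = List.map ((· + s) ∘ (· + (0 + 1))) (pvGoIdx ls 0) := by
      apply List.map_congr_left
      intro x _
      simp
      ring
    rw [h1, h2]

lemma pvGoIdx_nonneg (ls : List String) (s x : Int) (hs : 0 ≤ s)
    (hx : x ∈ pvGoIdx ls s) : 0 ≤ x := by
  simp only [pvGoIdx, List.mem_map, List.mem_filter] at hx
  rcases hx with ⟨p, ⟨hp, _⟩, rfl⟩
  rcases (PySem.List.mem_enumerate_iff ls s p).1 hp with ⟨k, hk, rfl⟩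
  have : (0 : Int) ≤ s + k := by omega
  simpa using this

-- shifting a slice past a prefix
lemma pvSlice_shift (pre rest : List String) (a b : Int) (ha : 0 ≤ a) (hb : 0 ≤ b) :
    PySem.List.slice (pre ++ rest) (some (a + pre.length)) (some (b + pre.length))
      = PySem.List.slice rest (some a) (some b) := by
  lift a to ℕ using ha
  lift b to ℕ using hb
  have h1 : (a : ℤ) + pre.length = ((a + pre.length : ℕ) : ℤ) := by push_cast; ring
  have h2 : (b : ℤ) + pre.length = ((b + pre.length : ℕ) : ℤ) := by push_cast; ring
  rw [h1, h2, PySem.List.slice_natCast, PySem.List.slice_natCast, List.drop_append]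
  have h3 : List.drop (a + pre.length) pre = [] := by
    apply List.drop_eq_nil_of_le; omega
  rw [h3, List.nil_append]
  congr 1
  · omega
  · congr 1; omega

-- zipping a mapped list with its tail
lemma pvZip_tail_map (f : Int → Int) (c : List Int) :
    (c.map f).zip (c.map f).tail = (c.zip c.tail).map (Prod.map f f) := by
  cases c with
  | nil => simp
  | cons a l =>
    show (List.map f (a :: l)).zip (List.map f l) = List.map (Prod.map f f) ((a :: l).zip l)
    exact List.zip_map

-- GO head of the dropWhile remainder
lemma pvGo_of_dropWhile (lines : List String) (g : String) (rest : List String)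
    (h : lines.dropWhile (fun x => !pvIsGo x) = g :: rest) : pvIsGo g = true := by
  induction lines with
  | nil => simp at h
  | cons l ls ih =>
    rw [List.dropWhile_cons] at h
    by_cases hl : pvIsGo l
    · simp [hl] at h
      rw [← h.1, hl]
    · simp [hl] at h
      exact ih h

-- all-non-GO input: A emits one batch (or nothing if empty)
lemma pvAspec_nonGo (lines : List String) (hall : ∀ x ∈ lines, pvIsGo x = false) :
    pvAspec lines [] = if lines = [] then [] else [PySem.Str.join "\n" lines, "GO"] := by
  cases lines with
  | nil => rfl
  | cons l ls =>
    simp only [pvAspec, hall l (by simp), Bool.false_eq_true, if_false, List.nil_append]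
    rw [pvAspec_ne ls [l] (by simp)]
    have h1 : ls.takeWhile (fun x => !pvIsGo x) = ls := by
      rw [List.takeWhile_eq_self_iff]
      intro x hx; simp [hall x (by simp [hx])]
    have h2 : ls.dropWhile (fun x => !pvIsGo x) = [] := by
      rw [List.dropWhile_eq_nil_iff]
      intro x hx; simp [hall x (by simp [hx])]
    simp [h1, h2, pvAspec]

-- main lemma: B's staged cut-pair slicing computes A's flushed-batch list
lemma pvBparts_eq (n : ℕ) : ∀ lines : List String, lines.length ≤ n →
    pvBparts lines = pvAspec lines [] := by
  induction n with
  | zero =>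
    intro lines h
    have hnil : lines = [] := by
      cases lines with
      | nil => rfl
      | cons l ls => simp at h
    subst hnil
    decide
  | succ n ih =>
    intro lines hlen
    cases hd : lines.dropWhile (fun x => !pvIsGo x) with
    | nil =>
      -- no GO line at all: a single batch
      have ht : lines.takeWhile (fun x => !pvIsGo x) = lines := by
        conv_rhs => rw [← List.takeWhile_append_dropWhile
          (p := fun x => !pvIsGo x) (l := lines)]
        simp [hd]
      have hall : ∀ x ∈ lines, pvIsGo x = false := by
        intro x hx
        have := List.mem_takeWhile_imp (ht ▸ hx)
        simpa using this
      rw [pvAspec_nonGo lines hall]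
      unfold pvBparts pvCuts
      rw [pvGoIdx_nil_of lines 0 hall]
      cases lines with
      | nil => decide
      | cons l ls =>
        simp only [List.nil_append, List.cons_append, List.tail_cons, List.zip_cons_cons,
          List.zip_nil_right, List.flatMap_cons, List.flatMap_nil, List.append_nil]
        have hgt : (((l :: ls).length : ℤ)) - (-1) > 1 := by
          simp only [List.length_cons]
          push_cast
          omega
        have hsl : PySem.List.slice (l :: ls) (some ((-1 : ℤ) + 1)) (some (((l :: ls).length : ℕ) : ℤ))
            = l :: ls := by
          have h0 : (-1 : ℤ) + 1 = ((0 : ℕ) : ℤ) := by norm_num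
          rw [h0, PySem.List.slice_natCast]
          simp
        simp only [pvBatch, hgt, if_true, hsl, List.cons_ne_nil, if_neg,
          not_false_eq_true]
    | cons g rest =>
      have hg : pvIsGo g = true := pvGo_of_dropWhile lines g rest hd
      generalize ht : lines.takeWhile (fun x => !pvIsGo x) = t
      have hts : lines = t ++ g :: rest := by
        rw [← ht, ← hd, List.takeWhile_append_dropWhile]
      have htall : ∀ x ∈ t, pvIsGo x = false := by
        intro x hx
        have := List.mem_takeWhile_imp (ht ▸ hx)
        simpa using this
      have hlenlines : lines.length = t.length + 1 + rest.length := by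
        rw [hts]
        simp
        omega
      have hrest_le : rest.length ≤ n := by omega
      set f : Int → Int := (· + ((t.length : ℤ) + 1)) with hf
      have hc' : pvCuts rest = -1 :: (pvGoIdx rest 0 ++ [(rest.length : ℤ)]) := rfl
      have hfneg : f (-1) = (t.length : ℤ) := by
        simp only [hf]
        omega
      have hflen : f ((rest.length : ℤ)) = ((lines.length : ℤ)) := by
        simp only [hf, hlenlines]
        push_cast
        ring
      -- cuts of lines = -1 :: (cuts of rest shifted by t.length+1)
      have hgo : pvGoIdx lines 0 = (t.length : ℤ) :: (pvGoIdx rest 0).map f := by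
        rw [hts, pvGoIdx_append, pvGoIdx_nil_of t 0 htall, pvGoIdx_cons,
          pvGoIdx_shift rest (0 + (t.length : ℤ) + 1), hg]
        simp [hf]
      have hcuts : pvCuts lines = -1 :: (pvCuts rest).map f := by
        show [-1] ++ pvGoIdx lines 0 ++ [((lines.length : ℕ) : ℤ)] = _
        rw [hgo, hc', List.map_cons, List.map_append, List.map_cons, List.map_nil,
          hfneg, hflen]
        simp
      have hmc : (pvCuts rest).map f
          = (t.length : ℤ) :: ((pvGoIdx rest 0 ++ [(rest.length : ℤ)]).map f) := by
        rw [hc', List.map_cons, hfneg]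
      have hzip : (pvCuts lines).zip (pvCuts lines).tail
          = ((-1 : ℤ), (t.length : ℤ)) ::
            (((pvCuts rest).zip (pvCuts rest).tail).map (Prod.map f f)) := by
        rw [hcuts, ← pvZip_tail_map f (pvCuts rest), hmc]
        simp only [List.tail_cons, List.zip_cons_cons]
      -- first batch is t (if nonempty)
      have hfirst : pvBatch lines (-1, (t.length : ℤ))
          = if t = [] then [] else [PySem.Str.join "\n" t, "GO"] := by
        by_cases hte : t = []
        · subst hte
          simp [pvBatch]
        · unfold pvBatch
          have h1 : ((t.length : ℤ)) - (-1) > 1 := by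
            have : 0 < t.length := List.length_pos_of_ne_nil hte
            omega
          rw [if_pos h1, if_neg hte]
          have h0 : (-1 : ℤ) + 1 = ((0 : ℕ) : ℤ) := by norm_num
          rw [h0, PySem.List.slice_natCast]
          simp only [Nat.sub_zero, List.drop_zero]
          rw [hts, List.take_left]
      -- shifted batches are rest's batches
      have hshift : ∀ p ∈ (pvCuts rest).zip (pvCuts rest).tail,
          pvBatch lines (Prod.map f f p) = pvBatch rest p := by
        intro p hp
        obtain ⟨p1, p2⟩ := p
        obtain ⟨h1, h2⟩ := List.of_mem_zip hp
        have ha : -1 ≤ p1 := by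
          rw [hc'] at h1
          rcases List.mem_cons.1 h1 with h | h
          · omega
          rcases List.mem_append.1 h with h | h
          · have := pvGoIdx_nonneg rest 0 p1 le_rfl h
            omega
          · simp at h
            omega
        have hb : 0 ≤ p2 := by
          rw [hc'] at h2
          simp only [List.tail_cons] at h2
          rcases List.mem_append.1 h2 with h | h
          · exact pvGoIdx_nonneg rest 0 p2 le_rfl h
          · simp at h
            omega
        simp only [pvBatch, Prod.map, hf]
        have hcond : (p2 + ((t.length : ℤ) + 1)) - (p1 + ((t.length : ℤ) + 1)) = p2 - p1 := by
          ring
        rw [hcond]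
        have hpre : lines = (t ++ [g]) ++ rest := by
          rw [hts]
          simp
        have hk : ((t.length : ℤ) + 1) = (((t ++ [g]).length : ℕ) : ℤ) := by simp
        have heq : p1 + ((t.length : ℤ) + 1) + 1 = (p1 + 1) + (((t ++ [g]).length : ℕ) : ℤ) := by
          rw [← hk]
          ring
        have heq2 : p2 + ((t.length : ℤ) + 1) = p2 + (((t ++ [g]).length : ℕ) : ℤ) := by
          rw [← hk]
        rw [heq, heq2, hpre, pvSlice_shift (t ++ [g]) rest (p1 + 1) p2 (by omega) hb]
      -- assemble B's side
      have hBsplit : pvBparts lines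
          = pvBatch lines (-1, (t.length : ℤ)) ++ pvBparts rest := by
        unfold pvBparts
        rw [hzip, List.flatMap_cons, List.flatMap_map,
          List.flatMap_congr (fun p hp => hshift p hp)]
      rw [hBsplit, hfirst, ih rest hrest_le]
      -- A's side
      cases t with
      | nil =>
        have hlines : lines = g :: rest := by
          rw [hts]
          rfl
        rw [hlines]
        simp [pvAspec, hg]
      | cons l t' =>
        have hlines : lines = l :: (t' ++ g :: rest) := by
          rw [hts]
          rfl
        have hl : pvIsGo l = false := htall l (by simp)
        have htw : (t' ++ g :: rest).takeWhile (fun x => !pvIsGo x) = t' := by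
          rw [hlines, List.takeWhile_cons] at ht
          simp only [hl, Bool.not_false, if_true, List.cons.injEq, true_and] at ht
          exact ht
        have hdw : (t' ++ g :: rest).dropWhile (fun x => !pvIsGo x) = g :: rest := by
          rw [hlines, List.dropWhile_cons] at hd
          simpa [hl] using hd
        rw [hlines]
        simp only [pvAspec, hl, Bool.false_eq_true, if_false, List.nil_append]
        rw [pvAspec_ne (t' ++ g :: rest) [l] (by simp), htw, hdw]
        simp [pvAspec, hg]

-- ===== VERDICT (by name: the statement is the Claim_ definition above) =====
theorem format_definition_with_go_py_spec : Claim_equal_format_definition_with_go_py := by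
  intro text _
  unfold Spec_format_definition_with_go_py
  have hA : format_definition_with_go_py text
      = PySem.Str.join "\n" (pvFlush ((PySem.Str.splitlines text).foldl pvStep ([], []))) := rfl
  rw [hA, pvA_foldl, pvB_eq_Bparts,
    pvBparts_eq (PySem.Str.splitlines text).length _ le_rfl]
  rfl
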